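-- pv_equiv track=rewrite | github.com/IdentityPython/pyFF | src/pyff/utils.py | subdomains
-- ===== SOURCE A (Python) =====
-- def subdomains(domain):
--     dl = []
--     dsplit = domain.split('.')
--     if len(dsplit) < 3:
--         dl.append(domain)
--     else:
--         for i in range(1, len(dsplit) - 1):
--             dl.append(".".join(dsplit[i:]))
--
--     return dl
-- ===== SOURCE B (Python) =====
-- def subdomains(domain):
--     dsplit = domain.split('.')
--     if len(dsplit) < 3:
--         return [domain]
--     out = []
--     current = dsplit[-1]
--     for label in reversed(dsplit[1:-1]):
--         current = label + '.' + current
--         out.append(current)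
--     out.reverse()
--     return out
-- ===== Notes on version B (the rewrite author's own statement) =====
-- stated objective: alternative
-- what changed: A re-joins the whole suffix from scratch with a join over a slice for every start index; B walks the labels right-to-left once, extending the current suffix string by one label per step, collecting suffixes shortest-first and reversing the list at the end.
import Mathlib
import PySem

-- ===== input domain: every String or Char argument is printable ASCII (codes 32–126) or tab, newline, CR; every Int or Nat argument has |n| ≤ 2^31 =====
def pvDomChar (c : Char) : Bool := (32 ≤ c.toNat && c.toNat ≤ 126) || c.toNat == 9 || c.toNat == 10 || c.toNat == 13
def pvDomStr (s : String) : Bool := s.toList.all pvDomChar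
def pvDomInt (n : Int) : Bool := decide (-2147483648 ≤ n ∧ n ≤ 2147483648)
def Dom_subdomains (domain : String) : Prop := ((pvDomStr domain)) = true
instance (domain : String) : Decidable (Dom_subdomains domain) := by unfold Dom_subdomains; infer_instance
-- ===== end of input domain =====

-- B replaces A's per-index re-join of a suffix slice by one right-to-left accumulation that
-- extends the current suffix string by one label per step, then reverses the collected list.

-- ===== PORT A =====
-- sep "." is nonempty, so split? is always `some`; getD [] is never the fallback
def subdomains (domain : String) : List String :=
  let dsplit := (PySem.Str.split? domain ".").getD []
  if dsplit.length < 3 then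
    [domain]
  else
    (PySem.List.pyRange 1 ((dsplit.length : Int) - 1) 1).foldl
      (fun dl i => dl ++ [PySem.Str.join "." (PySem.List.slice dsplit (some i) none)]) []

-- ===== PORT B =====
def subdomains_alt (domain : String) : List String :=
  let dsplit := (PySem.Str.split? domain ".").getD []
  if dsplit.length < 3 then
    [domain]
  else
    -- current = dsplit[-1] (list nonempty here, so dsplit[-1] is the last element)
    let p := ((PySem.List.slice dsplit (some 1) (some (-1))).reverse).foldl
      (fun (p : List String × String) label =>
        let current := label ++ "." ++ p.2
        (p.1 ++ [current], current))
      ([], dsplit.getLast?.getD "")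
    p.1.reverse

-- ===== PRECONDITION & SPEC =====
def Spec_subdomains (domain : String) (out : List String) : Prop := out = subdomains_alt domain
instance (domain : String) (out : List String) : Decidable (Spec_subdomains domain out) := by unfold Spec_subdomains; infer_instance

-- ===== CLAIM (what is proved, stated in full; the proofs are below) =====
def Claim_equal_subdomains : Prop := ∀ (domain : String), Dom_subdomains domain → Spec_subdomains domain (subdomains domain)

-- ===== LEMMAS AND PROOFS =====

/-- The dot-joined suffix `m ++ [c]` written as a right fold. -/
def pvJ (m : List String) (c : String) : String :=
  m.foldr (fun x s => x ++ "." ++ s) c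

theorem pvJoin_cons₂ (a : String) (rest : List String) (h : rest ≠ []) :
    PySem.Str.join "." (a :: rest) = a ++ "." ++ PySem.Str.join "." rest := by
  rcases rest with _ | ⟨q, t⟩
  · exact absurd rfl h
  · apply String.toList_injective
    simp [PySem.Str.toList_join, PySem.Chars.join_cons_cons]

theorem pvJoin_eq_J (m : List String) (c : String) :
    PySem.Str.join "." (m ++ [c]) = pvJ m c := by
  induction m with
  | nil =>
      apply String.toList_injective
      simp [PySem.Str.toList_join, PySem.Chars.join_singleton, pvJ]
  | cons a m ih =>
      rw [List.cons_append, pvJoin_cons₂ a (m ++ [c]) (by simp), ih]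
      simp [pvJ]

theorem pvFoldr_char (m : List String) (c : String) :
    m.foldr (fun label (p : List String × String) =>
        let current := label ++ "." ++ p.2
        (p.1 ++ [current], current)) ([], c)
      = (((List.range m.length).map (fun k => pvJ (m.drop k) c)).reverse, pvJ m c) := by
  induction m with
  | nil => simp [pvJ]
  | cons a m ih =>
      simp only [List.foldr_cons, ih]
      have h2 : pvJ (a :: m) c = a ++ "." ++ pvJ m c := by simp [pvJ]
      rw [Prod.mk.injEq]
      refine ⟨?_, h2.symm⟩
      rw [List.length_cons, List.range_succ_eq_map, List.map_cons, List.drop_zero,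
        List.map_map, List.reverse_cons, h2]
      congr 1

theorem pvMain (l : List String) (h : ¬ l.length < 3) :
    (PySem.List.pyRange 1 ((l.length : Int) - 1) 1).foldl
      (fun dl i => dl ++ [PySem.Str.join "." (PySem.List.slice l (some i) none)]) []
    = (((PySem.List.slice l (some 1) (some (-1))).reverse).foldl
        (fun (p : List String × String) label =>
          let current := label ++ "." ++ p.2
          (p.1 ++ [current], current))
        ([], l.getLast?.getD "")).1.reverse := by
  rw [Nat.not_lt] at h
  -- decompose l = d :: (m ++ [c0])
  obtain ⟨d, rest, rfl⟩ : ∃ d rest, l = d :: rest := by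
    cases l with
    | nil => simp at h
    | cons d rest => exact ⟨d, rest, rfl⟩
  obtain ⟨m, c0, rfl⟩ : ∃ m c0, rest = m ++ [c0] := by
    rcases rest.eq_nil_or_concat with h0 | ⟨m, c0, rfl⟩
    · subst h0; simp at h
    · exact ⟨m, c0, by simp⟩
  have hlen : (d :: (m ++ [c0])).length = m.length + 2 := by simp
  -- the slice dsplit[1:-1] is m
  have hslice : PySem.List.slice (d :: (m ++ [c0])) (some 1) (some (-1)) = m := by
    simp [PySem.List.slice, PySem.List.clampIdx]
    rw [if_neg (by omega : ¬((m.length:Int) + 1 < 0))]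
    simp
  -- dsplit[-1]
  have hlast : (d :: (m ++ [c0])).getLast?.getD "" = c0 := by
    have : d :: (m ++ [c0]) = (d :: m) ++ [c0] := by simp
    rw [this, List.getLast?_concat]
    rfl
  rw [hslice, hlast, PySem.List.foldl_append_singleton_eq_map, List.foldl_reverse]
  have := pvFoldr_char m c0
  rw [this]
  simp only [List.nil_append, List.reverse_reverse, hlen]
  rw [PySem.List.pyRange_one]
  have hcast : ((↑(m.length + 2) : Int) - 1 - 1).toNat = m.length := by omega
  rw [hcast, List.map_map]
  apply List.map_congr_left
  intro k hk
  simp only [List.mem_range] at hk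
  simp only [Function.comp]
  have h1 : (0:Int) ≤ 1 + (k:Int) := by omega
  rw [PySem.List.slice_from _ h1]
  have h2 : ((1:Int) + k).toNat = k + 1 := by omega
  rw [h2]
  have h3 : (d :: (m ++ [c0])).drop (k + 1) = m.drop k ++ [c0] := by
    simp [List.drop_append_of_le_length (by omega : k ≤ m.length)]
  rw [h3, pvJoin_eq_J]

-- ===== VERDICT (by name: the statement is the Claim_ definition above) =====
theorem subdomains_spec : Claim_equal_subdomains := by
  intro domain _
  unfold Spec_subdomains subdomains subdomains_alt
  set l := (PySem.Str.split? domain ".").getD [] with hl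
  by_cases h : l.length < 3
  · simp [h]
  · simp only [h, if_false]
    exact pvMain l h
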